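-- pv_equiv track=rewrite | github.com/LucianoArgolo22/Python-Programming-Course | Clase02/diccionario_geringoso.py | geringoso
-- ===== SOURCE A (Python) =====
-- def geringoso(palabra):
--     llave = palabra
--     lista_de_letras = []
--
--     for c in palabra:
--         if c.lower() in ["a","e","i","o","u"]:
--             c = c + "p" + c
--         lista_de_letras.append(c)
--
--     palabra_geringoso = ''.join(lista_de_letras)
--     return palabra_geringoso
-- ===== SOURCE B (Python) =====
-- def geringoso(palabra):
--     # Ten staged whole-string passes: each vowel (both cases) is expanded by one
--     # str.replace sweep.  Safe because a replacement v+'p'+v only contains the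
--     # vowel already processed and 'p', which no later stage touches.
--     for v in "aeiouAEIOU":
--         palabra = palabra.replace(v, v + "p" + v)
--     return palabra
-- ===== Notes on version B (the rewrite author's own statement) =====
-- stated objective: alternative
-- what changed: Replaced A's single per-character loop with a branch and list accumulation by ten staged whole-string str.replace passes, one per vowel case, with a non-interference argument (each replacement introduces only the already-processed vowel and 'p').
import Mathlib
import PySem

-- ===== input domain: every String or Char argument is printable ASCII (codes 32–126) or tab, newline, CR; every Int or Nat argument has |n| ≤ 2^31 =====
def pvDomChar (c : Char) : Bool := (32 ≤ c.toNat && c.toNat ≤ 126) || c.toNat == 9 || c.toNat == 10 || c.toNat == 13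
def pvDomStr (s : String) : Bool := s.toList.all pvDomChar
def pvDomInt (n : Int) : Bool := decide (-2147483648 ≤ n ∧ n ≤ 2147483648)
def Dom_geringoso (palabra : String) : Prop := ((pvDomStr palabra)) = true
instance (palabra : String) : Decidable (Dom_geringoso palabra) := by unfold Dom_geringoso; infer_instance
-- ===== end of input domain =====

-- B replaces A's single per-character loop (branch + list accumulation) by ten staged
-- whole-string replace passes, one per vowel case; same O(n), alternative structure.

-- ===== PORT A =====
def geringoso (palabra : String) : String :=
  let lista_de_letras : List String :=
    palabra.toList.foldl (fun acc c =>
      acc ++ [if PySem.Chars.lowerChar c ∈ (['a','e','i','o','u'] : List Char)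
              then String.ofList [c, 'p', c] else String.ofList [c]]) []
  PySem.Str.join "" lista_de_letras

-- ===== PORT B =====
-- Source B: for v in "aeiouAEIOU": palabra = palabra.replace(v, v + "p" + v)
def geringoso_alt (palabra : String) : String :=
  "aeiouAEIOU".toList.foldl
    (fun s v => PySem.Str.replace s (String.ofList [v]) (String.ofList [v, 'p', v]))
    palabra

-- ===== PRECONDITION & SPEC =====
def Spec_geringoso (palabra : String) (out : String) : Prop := out = geringoso_alt palabra
instance (palabra : String) (out : String) : Decidable (Spec_geringoso palabra out) := by unfold Spec_geringoso; infer_instance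

-- ===== CLAIM =====
def Claim_equal_geringoso : Prop := ∀ (palabra : String), Dom_geringoso palabra → Spec_geringoso palabra (geringoso palabra)

-- ===== LEMMAS AND PROOFS =====

set_option maxRecDepth 40000

-- one whole-string pass of B, at the list-of-chars level
def stage (v : Char) (l : List Char) : List Char :=
  l.flatMap (fun c => if c = v then [v, 'p', v] else [c])

-- all ten of B's passes
def stagesL (l : List Char) : List Char :=
  "aeiouAEIOU".toList.foldl (fun s v => stage v s) l

-- A's per-character expansion
def expandA (c : Char) : List Char :=
  if PySem.Chars.lowerChar c ∈ (['a','e','i','o','u'] : List Char)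
  then [c, 'p', c] else [c]

-- replace with a single-char pattern is the flatMap that expands that char
lemma replace_go_single (v : Char) (new : List Char) :
    ∀ (l acc : List Char) (fuel : Nat), l.length ≤ fuel →
      PySem.Chars.replace.go [v] new fuel l acc
        = acc.reverse ++ l.flatMap (fun c => if c = v then new else [c]) := by
  intro l
  induction l with
  | nil =>
    intro acc fuel _
    cases fuel <;> rw [PySem.Chars.replace.go.eq_def] <;> simp
  | cons c t ih =>
    intro acc fuel hf
    cases fuel with
    | zero => simp at hf
    | succ f =>
      rw [PySem.Chars.replace.go.eq_def]
      simp only [List.isPrefixOf, Bool.and_true]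
      by_cases h : c = v
      · subst h
        simp only [beq_self_eq_true, if_pos, List.length_cons, List.length_nil,
          List.drop_succ_cons, List.drop_zero]
        rw [ih (new.reverse ++ acc) f (by simpa using Nat.succ_le_succ_iff.mp hf)]
        simp [List.flatMap_cons]
      · have hb : (v == c) = false := by simp [beq_eq_false_iff_ne]; exact fun e => h e.symm
        rw [hb]
        simp only [Bool.false_eq_true, if_false]
        rw [ih (c :: acc) f (by simpa using Nat.succ_le_succ_iff.mp hf)]
        simp [List.flatMap_cons, h]

lemma replace_single (v : Char) (new l : List Char) :
    PySem.Chars.replace l [v] new = l.flatMap (fun c => if c = v then new else [c]) := by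
  rw [PySem.Chars.replace]
  simp only [List.isEmpty_cons, Bool.false_eq_true, if_false]
  simpa using replace_go_single v new l [] l.length le_rfl

-- each stage is a list homomorphism, hence so is the composite of B's stages
lemma stage_append (v : Char) (l1 l2 : List Char) :
    stage v (l1 ++ l2) = stage v l1 ++ stage v l2 := by
  simp [stage, List.flatMap_append]

lemma foldl_stage_append (V : List Char) :
    ∀ l1 l2 : List Char,
      V.foldl (fun s v => stage v s) (l1 ++ l2)
        = V.foldl (fun s v => stage v s) l1 ++ V.foldl (fun s v => stage v s) l2 := by
  induction V with
  | nil => intro l1 l2; rfl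
  | cons v vs ih => intro l1 l2; rw [List.foldl_cons, stage_append, ih]; rfl

-- on any single ASCII character B's ten stages produce A's expansion
lemma perChar : ∀ n < 127, stagesL [Char.ofNat n] = expandA (Char.ofNat n) := by decide

lemma asciiChar_lt (c : Char) (h : pvDomChar c = true) : c.toNat < 127 := by
  unfold pvDomChar at h
  simp only [Bool.or_eq_true, Bool.and_eq_true, decide_eq_true_eq, beq_iff_eq] at h
  omega

lemma stagesL_eq_flatMap (l : List Char) (h : ∀ c ∈ l, pvDomChar c = true) :
    stagesL l = l.flatMap expandA := by
  induction l with
  | nil => rfl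
  | cons c t ih =>
    have hc : c.toNat < 127 := asciiChar_lt c (h c List.mem_cons_self)
    have h1 : stagesL ([c] ++ t) = stagesL [c] ++ stagesL t := foldl_stage_append _ [c] t
    rw [show (c :: t) = [c] ++ t from rfl, h1,
        ih (fun d hd => h d (List.mem_cons_of_mem _ hd))]
    have := perChar c.toNat hc
    rw [Char.ofNat_toNat] at this
    rw [this, List.flatMap_append]
    simp [expandA]

-- B's String-level fold computes the list-level stages
lemma alt_fold_toList (V : List Char) :
    ∀ s : String,
      (V.foldl (fun s v => PySem.Str.replace s (String.ofList [v]) (String.ofList [v, 'p', v])) s).toList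
        = V.foldl (fun l v => stage v l) s.toList := by
  induction V with
  | nil => intro s; rfl
  | cons v vs ih =>
    intro s
    rw [List.foldl_cons, List.foldl_cons, ih]
    congr 1
    rw [PySem.Str.toList_replace, String.toList_ofList, String.toList_ofList]
    exact replace_single v [v, 'p', v] s.toList

-- A-side helpers (same as a direct join computation)
lemma flatten_intersperse_nil (l : List (List Char)) :
    (List.intersperse ([] : List Char) l).flatten = l.flatten := by
  induction l with
  | nil => rfl
  | cons x xs ih =>
    cases xs with
    | nil => rfl
    | cons y ys =>
      rw [show List.intersperse ([] : List Char) (x :: y :: ys)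
            = x :: [] :: List.intersperse [] (y :: ys) from rfl,
          List.flatten_cons, List.flatten_cons, ih]
      simp [List.flatten_cons]

lemma flatMap_single (f : Char → String) (l : List Char) :
    l.flatMap (fun c => [f c]) = l.map f := by
  induction l with
  | nil => rfl
  | cons x xs ih => simp [ih]

lemma perCharA (c : Char) :
    (if PySem.Chars.lowerChar c ∈ (['a','e','i','o','u'] : List Char)
     then String.ofList [c, 'p', c] else String.ofList [c]).toList = expandA c := by
  rw [apply_ite String.toList, String.toList_ofList, String.toList_ofList]; rfl

lemma geringoso_eq (palabra : String) :
    geringoso palabra = String.ofList (palabra.toList.flatMap expandA) := by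
  unfold geringoso
  rw [PySem.List.foldl_append_eq_flatMap
        (g := fun c => [if PySem.Chars.lowerChar c ∈ (['a','e','i','o','u'] : List Char)
                        then String.ofList [c, 'p', c] else String.ofList [c]])]
  simp only [List.nil_append, PySem.Str.join, PySem.Chars.join]
  have h0 : ("" : String).toList = ([] : List Char) := by decide
  rw [h0, List.intercalate, flatten_intersperse_nil, flatMap_single, List.map_map,
      ← List.flatMap_def]
  congr 1
  congr 1
  funext c
  exact perCharA c

-- ===== VERDICT =====
theorem geringoso_spec : Claim_equal_geringoso := by
  intro palabra hdom
  unfold Spec_geringoso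
  have hdc : ∀ c ∈ palabra.toList, pvDomChar c = true := by
    have hd := hdom; unfold Dom_geringoso pvDomStr at hd
    simpa [List.all_eq_true] using hd
  have hB : (geringoso_alt palabra).toList = palabra.toList.flatMap expandA := by
    unfold geringoso_alt
    rw [alt_fold_toList]
    exact stagesL_eq_flatMap _ hdc
  have : (geringoso palabra).toList = (geringoso_alt palabra).toList := by
    rw [geringoso_eq, String.toList_ofList, hB]
  exact String.toList_inj.mp this
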